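-- pv_equiv track=rewrite | github.com/jacobwarren/social-media-ai-engineering-etl | features/profanity.py | determine_profanity_category
-- ===== SOURCE A (Python) =====
-- from typing import Literal
--
-- def determine_profanity_category(text: str) -> Literal["none","light","moderate","heavy"]:
--     categorized_words = {
--         "apeshit": "moderate",
--         "arsehole": "light",
--         "ass": "light",
--         "asshole": "light",
--         "bastard": "moderate",
--         "bullshit": "moderate",
--         "bitch": "moderate",
--         "clusterfuck": "heavy",
--         "damn": "moderate",
--         "damnit": "moderate",
--         "fuck": "heavy",
--         "fucker": "heavy",
--         "fuckin": "heavy",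
--         "fucking": "heavy",
--         "goddamn": "heavy",
--         "bollocks": "light",
--         "hell": "light",
--         "holy shit": "moderate",
--         "horseshit": "moderate",
--         "motherfucker": "heavy",
--         "mother fucker": "heavy",
--         "piss": "light",
--         "pissed": "light",
--         "shit": "moderate",
--     }
--     words_in_text = text.lower().split()
--     highest_severity = "none"
--     severity_mapping = {"none": 0, "light": 1, "moderate": 2, "heavy": 3}
--     for word in words_in_text[:1000]:
--         category = categorized_words.get(word, "none")
--         if severity_mapping[category] > severity_mapping[highest_severity]:
--             highest_severity = category
--     return highest_severity
-- ===== SOURCE B (Python) =====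
-- _HEAVY = frozenset([
--     "clusterfuck", "fuck", "fucker", "fuckin", "fucking",
--     "goddamn", "motherfucker", "mother fucker",
-- ])
-- _MODERATE = frozenset([
--     "apeshit", "bastard", "bullshit", "bitch", "damn", "damnit",
--     "holy shit", "horseshit", "shit",
-- ])
-- _LIGHT = frozenset([
--     "arsehole", "ass", "asshole", "bollocks", "hell", "piss", "pissed",
-- ])
--
-- def determine_profanity_category(text: str):
--     words = set(text.lower().split()[:1000])
--     if words & _HEAVY:
--         return "heavy"
--     if words & _MODERATE:
--         return "moderate"
--     if words & _LIGHT: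
--         return "light"
--     return "none"
-- ===== Notes on version B (the rewrite author's own statement) =====
-- stated objective: alternative
-- what changed: Replaces the per-word running-max scan over a word->severity dict with a partition of that dict into three tier sets and set-intersection tests in descending severity order on the deduplicated first-1000-word set.
import Mathlib
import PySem

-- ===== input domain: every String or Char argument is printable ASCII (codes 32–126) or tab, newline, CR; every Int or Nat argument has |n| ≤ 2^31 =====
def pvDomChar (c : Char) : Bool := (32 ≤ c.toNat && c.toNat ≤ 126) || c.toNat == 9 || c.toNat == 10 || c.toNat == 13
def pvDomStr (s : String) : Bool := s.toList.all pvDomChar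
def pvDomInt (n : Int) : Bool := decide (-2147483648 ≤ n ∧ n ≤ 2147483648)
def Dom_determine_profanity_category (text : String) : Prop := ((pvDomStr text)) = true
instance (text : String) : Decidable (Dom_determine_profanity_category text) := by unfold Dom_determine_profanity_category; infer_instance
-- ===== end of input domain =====

-- ===== PORT A =====
-- B partitions the word→severity dict into three tier sets and tests set intersections
-- in descending severity order instead of a per-word running-max scan (objective: alternative).

-- the dict literal `categorized_words` (keys distinct, insertion order)
def pvCatWords : PySem.Dict String String := PySem.Dict.mk [
  ("apeshit", "moderate"),
  ("arsehole", "light"),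
  ("ass", "light"),
  ("asshole", "light"),
  ("bastard", "moderate"),
  ("bullshit", "moderate"),
  ("bitch", "moderate"),
  ("clusterfuck", "heavy"),
  ("damn", "moderate"),
  ("damnit", "moderate"),
  ("fuck", "heavy"),
  ("fucker", "heavy"),
  ("fuckin", "heavy"),
  ("fucking", "heavy"),
  ("goddamn", "heavy"),
  ("bollocks", "light"),
  ("hell", "light"),
  ("holy shit", "moderate"),
  ("horseshit", "moderate"),
  ("motherfucker", "heavy"),
  ("mother fucker", "heavy"),
  ("piss", "light"),
  ("pissed", "light"),
  ("shit", "moderate")]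

-- the dict literal `severity_mapping`
def pvSevMap : PySem.Dict String Int := PySem.Dict.mk [
  ("none", 0), ("light", 1), ("moderate", 2), ("heavy", 3)]

def determine_profanity_category (text : String) : String :=
  let words_in_text := PySem.Str.split₀ (PySem.Str.lower text)
  (PySem.List.slice words_in_text none (some 1000)).foldl
    (fun highest_severity word =>
      let category := pvCatWords.getD word "none"
      -- severity_mapping[category] / [highest_severity]: both arguments are always keys
      -- of severity_mapping, so Python's raising [] lookup is exactly getD here
      if pvSevMap.getD category 0 > pvSevMap.getD highest_severity 0 then category
      else highest_severity)
    "none"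

-- ===== PORT B =====
-- the three frozenset literals _HEAVY / _MODERATE / _LIGHT
def pvHeavySet : PySem.Set String := PySem.Set.ofList ["clusterfuck", "fuck", "fucker", "fuckin", "fucking", "goddamn", "motherfucker", "mother fucker"]
def pvModerateSet : PySem.Set String := PySem.Set.ofList ["apeshit", "bastard", "bullshit", "bitch", "damn", "damnit", "holy shit", "horseshit", "shit"]
def pvLightSet : PySem.Set String := PySem.Set.ofList ["arsehole", "ass", "asshole", "bollocks", "hell", "piss", "pissed"]

def determine_profanity_category_alt (text : String) : String :=
  let words : PySem.Set String :=
    PySem.Set.ofList (PySem.List.slice (PySem.Str.split₀ (PySem.Str.lower text)) none (some 1000))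
  if PySem.Set.inter words pvHeavySet ≠ [] then "heavy"
  else if PySem.Set.inter words pvModerateSet ≠ [] then "moderate"
  else if PySem.Set.inter words pvLightSet ≠ [] then "light"
  else "none"

-- ===== PRECONDITION & SPEC =====
def Spec_determine_profanity_category (text : String) (out : String) : Prop := out = determine_profanity_category_alt text
instance (text : String) (out : String) : Decidable (Spec_determine_profanity_category text out) := by unfold Spec_determine_profanity_category; infer_instance

-- ===== CLAIM (what is proved, stated in full; the proofs are below) =====
def Claim_equal_determine_profanity_category : Prop := ∀ (text : String), Dom_determine_profanity_category text → Spec_determine_profanity_category text (determine_profanity_category text)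

-- ===== LEMMAS AND PROOFS =====
def pvCat (w : String) : String := pvCatWords.getD w "none"
def pvRank (c : String) : Nat :=
  if c = "heavy" then 3 else if c = "moderate" then 2 else if c = "light" then 1 else 0
def pvName (n : Nat) : String :=
  if n = 3 then "heavy" else if n = 2 then "moderate" else if n = 1 then "light" else "none"
def pvMax (ws : List String) : Nat := ws.foldr (fun w m => max (pvRank (pvCat w)) m) 0

-- one 24-way case analysis on the word settles every per-word fact at once
lemma pvCat_full (w : String) :
    ((w ∈ pvHeavySet) ↔ pvCat w = "heavy") ∧
    ((w ∈ pvModerateSet) ↔ pvCat w = "moderate") ∧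
    ((w ∈ pvLightSet) ↔ pvCat w = "light") ∧
    (pvCat w = "none" ∨ pvCat w = "light" ∨ pvCat w = "moderate" ∨ pvCat w = "heavy") := by
  by_cases h1 : w = "apeshit"
  · subst h1; decide
  by_cases h2 : w = "arsehole"
  · subst h2; decide
  by_cases h3 : w = "ass"
  · subst h3; decide
  by_cases h4 : w = "asshole"
  · subst h4; decide
  by_cases h5 : w = "bastard"
  · subst h5; decide
  by_cases h6 : w = "bullshit"
  · subst h6; decide
  by_cases h7 : w = "bitch"
  · subst h7; decide
  by_cases h8 : w = "clusterfuck"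
  · subst h8; decide
  by_cases h9 : w = "damn"
  · subst h9; decide
  by_cases h10 : w = "damnit"
  · subst h10; decide
  by_cases h11 : w = "fuck"
  · subst h11; decide
  by_cases h12 : w = "fucker"
  · subst h12; decide
  by_cases h13 : w = "fuckin"
  · subst h13; decide
  by_cases h14 : w = "fucking"
  · subst h14; decide
  by_cases h15 : w = "goddamn"
  · subst h15; decide
  by_cases h16 : w = "bollocks"
  · subst h16; decide
  by_cases h17 : w = "hell"
  · subst h17; decide
  by_cases h18 : w = "holy shit"
  · subst h18; decide
  by_cases h19 : w = "horseshit"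
  · subst h19; decide
  by_cases h20 : w = "motherfucker"
  · subst h20; decide
  by_cases h21 : w = "mother fucker"
  · subst h21; decide
  by_cases h22 : w = "piss"
  · subst h22; decide
  by_cases h23 : w = "pissed"
  · subst h23; decide
  by_cases h24 : w = "shit"
  · subst h24; decide
  simp [pvCat, pvCatWords, pvHeavySet, pvModerateSet, pvLightSet,
    PySem.Dict.getD_eq_get?_getD, PySem.Dict.get?_mk_cons, PySem.Set.mem_ofList,
    h1, h2, h3, h4, h5, h6, h7, h8, h9, h10, h11, h12, h13, h14, h15, h16, h17, h18, h19, h20, h21, h22, h23, h24,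
    Ne.symm h1, Ne.symm h2, Ne.symm h3, Ne.symm h4, Ne.symm h5, Ne.symm h6, Ne.symm h7, Ne.symm h8, Ne.symm h9, Ne.symm h10, Ne.symm h11, Ne.symm h12, Ne.symm h13, Ne.symm h14, Ne.symm h15, Ne.symm h16, Ne.symm h17, Ne.symm h18, Ne.symm h19, Ne.symm h20, Ne.symm h21, Ne.symm h22, Ne.symm h23, Ne.symm h24]
  simp [PySem.Dict.get?, List.find?]

lemma pvRank_le (c : String) : pvRank c ≤ 3 := by
  unfold pvRank; split_ifs <;> omega

lemma rank3_iff (c : String) : pvRank c = 3 ↔ c = "heavy" := by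
  unfold pvRank; split_ifs <;> simp_all

lemma rank2_iff (c : String) : pvRank c = 2 ↔ c = "moderate" := by
  unfold pvRank; split_ifs <;> simp_all

lemma rank1_iff (c : String) : pvRank c = 1 ↔ c = "light" := by
  unfold pvRank; split_ifs <;> simp_all

lemma four_of_name (c : String) (h : pvName (pvRank c) = c) :
    c = "none" ∨ c = "light" ∨ c = "moderate" ∨ c = "heavy" := by
  by_cases h3 : c = "heavy"
  · tauto
  by_cases h2 : c = "moderate"
  · tauto
  by_cases h1 : c = "light"
  · tauto
  left
  have h0 : pvRank c = 0 := by unfold pvRank; simp [h1, h2, h3]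
  rw [h0] at h
  simp [pvName] at h
  exact h.symm

lemma pvName_rank_of_le (m : Nat) (hm : m ≤ 3) : pvRank (pvName m) = m := by
  interval_cases m <;> decide

lemma step_eq (acc w : String) (ha : pvName (pvRank acc) = acc) :
    (if pvSevMap.getD (pvCatWords.getD w "none") 0 > pvSevMap.getD acc 0
     then pvCatWords.getD w "none" else acc) =
    pvName (max (pvRank (pvCat w)) (pvRank acc)) := by
  have hw4 := (pvCat_full w).2.2.2
  have ha4 := four_of_name acc ha
  rw [show pvCatWords.getD w "none" = pvCat w from rfl]
  rcases hw4 with h | h | h | h <;> rw [h] <;>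
    rcases ha4 with rfl | rfl | rfl | rfl <;> decide

lemma fold_eq (ws : List String) (acc : String) (ha : pvName (pvRank acc) = acc) :
    ws.foldl
      (fun highest_severity word =>
        let category := pvCatWords.getD word "none"
        if pvSevMap.getD category 0 > pvSevMap.getD highest_severity 0 then category
        else highest_severity)
      acc = pvName (max (pvRank acc) (pvMax ws)) := by
  induction ws generalizing acc with
  | nil => simpa [pvMax] using ha.symm
  | cons w ws ih =>
    have hstep := step_eq acc w ha
    have hle : max (pvRank (pvCat w)) (pvRank acc) ≤ 3 := by
      have h1 := pvRank_le (pvCat w)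
      have h2 := pvRank_le acc
      omega
    simp only [List.foldl_cons]
    rw [hstep, ih _ (by rw [pvName_rank_of_le _ hle])]
    rw [pvName_rank_of_le _ hle]
    have : pvMax (w :: ws) = max (pvRank (pvCat w)) (pvMax ws) := rfl
    rw [this, Nat.max_comm (pvRank (pvCat w)) (pvRank acc), Nat.max_assoc]

lemma inter_ne_iff (ws t : List String) :
    (PySem.Set.inter (PySem.Set.ofList ws) t ≠ []) ↔ ∃ w ∈ ws, w ∈ t := by
  simp [PySem.Set.inter, List.filter_eq_nil_iff, PySem.Set.mem_ofList]

lemma pvMax_le (ws : List String) : pvMax ws ≤ 3 := by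
  induction ws with
  | nil => simp [pvMax]
  | cons w ws ih =>
    have h := pvRank_le (pvCat w)
    have : pvMax (w :: ws) = max (pvRank (pvCat w)) (pvMax ws) := rfl
    omega

lemma le_pvMax_of_mem (ws : List String) (w : String) (hw : w ∈ ws) :
    pvRank (pvCat w) ≤ pvMax ws := by
  induction ws with
  | nil => cases hw
  | cons x xs ih =>
    have : pvMax (x :: xs) = max (pvRank (pvCat x)) (pvMax xs) := rfl
    rcases List.mem_cons.mp hw with rfl | hw'
    · omega
    · have := ih hw'; omega

lemma pvMax_attained (ws : List String) :
    pvMax ws = 0 ∨ ∃ w ∈ ws, pvRank (pvCat w) = pvMax ws := by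
  induction ws with
  | nil => left; simp [pvMax]
  | cons x xs ih =>
    have hx : pvMax (x :: xs) = max (pvRank (pvCat x)) (pvMax xs) := rfl
    rcases Nat.le_total (pvRank (pvCat x)) (pvMax xs) with h | h
    · rcases ih with h0 | ⟨w, hw, hrw⟩
      · rcases Nat.eq_zero_or_pos (pvRank (pvCat x)) with h1 | h1
        · left; omega
        · right; exact ⟨x, List.mem_cons_self, by omega⟩
      · right; exact ⟨w, List.mem_cons_of_mem _ hw, by omega⟩
    · right; exact ⟨x, List.mem_cons_self, by omega⟩

-- ===== VERDICT (by name: the statement is the Claim_ definition above) =====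
theorem determine_profanity_category_spec : Claim_equal_determine_profanity_category := by
  intro text _
  unfold Spec_determine_profanity_category determine_profanity_category determine_profanity_category_alt
  set ws := PySem.List.slice (PySem.Str.split₀ (PySem.Str.lower text)) none (some 1000) with hws
  rw [fold_eq ws "none" (by decide)]
  have hA : pvName (max (pvRank "none") (pvMax ws)) = pvName (pvMax ws) := by
    have : pvRank "none" = 0 := by decide
    rw [this, Nat.zero_max]
  rw [hA]
  have hmax := pvMax_le ws
  by_cases h3 : PySem.Set.inter (PySem.Set.ofList ws) pvHeavySet ≠ []
  · rw [if_pos h3]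
    obtain ⟨w, hw, hwt⟩ := (inter_ne_iff ws pvHeavySet).mp h3
    have hr : pvRank (pvCat w) = 3 := (rank3_iff _).mpr ((pvCat_full w).1.mp hwt)
    have := le_pvMax_of_mem ws w hw
    have : pvMax ws = 3 := by omega
    rw [this]; rfl
  · rw [if_neg h3]
    have hno3 : ∀ w ∈ ws, pvRank (pvCat w) ≠ 3 := by
      intro w hw hc
      exact h3 ((inter_ne_iff ws pvHeavySet).mpr ⟨w, hw, (pvCat_full w).1.mpr ((rank3_iff _).mp hc)⟩)
    by_cases h2 : PySem.Set.inter (PySem.Set.ofList ws) pvModerateSet ≠ []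
    · rw [if_pos h2]
      obtain ⟨w, hw, hwt⟩ := (inter_ne_iff ws pvModerateSet).mp h2
      have hr : pvRank (pvCat w) = 2 := (rank2_iff _).mpr ((pvCat_full w).2.1.mp hwt)
      have hle := le_pvMax_of_mem ws w hw
      have h33 : pvMax ws ≠ 3 := by
        rcases pvMax_attained ws with h0 | ⟨v, hv, hrv⟩
        · omega
        · intro hc; exact hno3 v hv (by omega)
      have h22 : pvMax ws = 2 := by omega
      rw [h22]; rfl
    · rw [if_neg h2]
      have hno2 : ∀ w ∈ ws, pvRank (pvCat w) ≠ 2 := by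
        intro w hw hc
        exact h2 ((inter_ne_iff ws pvModerateSet).mpr ⟨w, hw, (pvCat_full w).2.1.mpr ((rank2_iff _).mp hc)⟩)
      by_cases h1 : PySem.Set.inter (PySem.Set.ofList ws) pvLightSet ≠ []
      · rw [if_pos h1]
        obtain ⟨w, hw, hwt⟩ := (inter_ne_iff ws pvLightSet).mp h1
        have hr : pvRank (pvCat w) = 1 := (rank1_iff _).mpr ((pvCat_full w).2.2.1.mp hwt)
        have hle := le_pvMax_of_mem ws w hw
        rcases pvMax_attained ws with h0 | ⟨v, hv, hrv⟩
        · omega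
        · have hn3 := hno3 v hv
          have hn2 := hno2 v hv
          have h11 : pvMax ws = 1 := by omega
          rw [h11]; rfl
      · rw [if_neg h1]
        have hno1 : ∀ w ∈ ws, pvRank (pvCat w) ≠ 1 := by
          intro w hw hc
          exact h1 ((inter_ne_iff ws pvLightSet).mpr ⟨w, hw, (pvCat_full w).2.2.1.mpr ((rank1_iff _).mp hc)⟩)
        rcases pvMax_attained ws with h0 | ⟨v, hv, hrv⟩
        · rw [h0]; rfl
        · have hn3 := hno3 v hv
          have hn2 := hno2 v hv
          have hn1 := hno1 v hv
          have h00 : pvMax ws = 0 := by omega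
          rw [h00]; rfl
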